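-- pv_equiv track=rewrite | github.com/spinifexgroup-studio/deadline | deadline6/python/Spinifex.py | GetStudioRoot
-- ===== SOURCE A (Python) =====
-- def GetStudioRoot ( directory ):
-- 	print ( "Input Directory is: %s" % directory )
--
-- 	# Make directory UNC friendly and split into array
-- 	directory = directory.replace("\\","/")
-- 	directorySplit = directory.split('/')
--
-- 	# Get first item of directory array and prep whether using mac or PC
-- 	studioDirectory = ''
-- 	if directorySplit[1] == '':
-- 		studioDirectory = '/'
-- 		directorySplit.pop(0)
-- 		directorySplit.pop(0)
-- 	else:
-- 		if directorySplit[0] == '':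
-- 			directorySplit.pop(0)
-- 			studioDirectory = ''
-- 		else:
-- 			studioDirectory = directorySplit.pop(0)
--
-- 	# Start stripping the array until we get to the 2D or 3D folder
-- 	while len(directorySplit) > 0:
-- 		popItem = directorySplit.pop()
-- 		if popItem == '2D' or popItem == '3D':
-- 			for pathItem in directorySplit:
-- 				studioDirectory = ("%s/%s" % (studioDirectory,pathItem))
-- 			break
-- 	else:
-- 		studioDirectory = directory
--
-- 	print ( "Studio Directory is: %s" % studioDirectory )
-- 	return studioDirectory
-- ===== SOURCE B (Python) =====
-- def GetStudioRoot(directory):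
--     print("Input Directory is: %s" % directory)
--     normalized = directory.replace("\\", "/")
--     parts = normalized.split('/')
--     if parts[1] == '':
--         pre, body = '/', parts[2:]
--     elif parts[0] == '':
--         pre, body = '', parts[1:]
--     else:
--         pre, body = parts[0], parts[1:]
--     last = -1
--     for i, item in enumerate(body):
--         if item in ('2D', '3D'):
--             last = i
--     root = '/'.join([pre] + body[:last]) if last >= 0 else normalized
--     print("Studio Directory is: %s" % root)
--     return root
-- ===== Notes on version B (the rewrite author's own statement) =====
-- stated objective: simpler
-- what changed: Replaces A's destructive pop-from-the-back while-loop (with a string-accumulating inner for-loop) by a single forward scan that records the last index of a '2D'/'3D' component, followed by one '/'.join of the prefix.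
import Mathlib
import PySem

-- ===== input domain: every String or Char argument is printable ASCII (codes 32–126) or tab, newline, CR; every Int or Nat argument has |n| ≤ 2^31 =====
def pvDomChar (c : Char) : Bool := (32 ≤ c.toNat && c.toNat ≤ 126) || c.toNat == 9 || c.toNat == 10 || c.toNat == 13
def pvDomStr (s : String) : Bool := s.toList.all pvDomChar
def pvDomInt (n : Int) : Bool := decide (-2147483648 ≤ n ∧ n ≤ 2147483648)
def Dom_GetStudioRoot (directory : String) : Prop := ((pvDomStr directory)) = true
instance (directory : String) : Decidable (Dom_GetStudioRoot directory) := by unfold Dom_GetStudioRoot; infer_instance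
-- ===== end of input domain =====

-- B replaces A's destructive pop-from-the-back while-loop and string-accumulating for-loop by a single
-- forward scan for the last '2D'/'3D' index followed by one '/'.join — objective: simpler. (The two print
-- statements of A are kept in B; they are side effects, the equivalence proved is about the return value.)

-- ===== PORT A =====
-- A's while-loop: pop from the back until a '2D'/'3D' item, then fold the remaining items onto studio;
-- if the list empties without a break, return the (normalized) directory string.
def pvLoopA (studio dir : List Char) (rest : List (List Char)) : List Char :=
  if h : rest = [] then dir
  else
    let popItem := rest.getLast h
    let rest' := rest.dropLast
    if popItem = ['2','D'] ∨ popItem = ['3','D'] then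
      rest'.foldl (fun s p => s ++ '/' :: p) studio
    else pvLoopA studio dir rest'
termination_by rest.length
decreasing_by
  have : rest.length ≠ 0 := fun hlen => h (List.eq_nil_of_length_eq_zero hlen)
  simp [List.length_dropLast]; omega

def GetStudioRoot (directory : String) : String :=
  let dir := PySem.Chars.replace directory.toList ['\\'] ['/']
  match PySem.Chars.splitOn dir ['/'] with
  | p0 :: p1 :: rest =>
      if p1 = [] then String.ofList (pvLoopA ['/'] dir rest)
      else if p0 = [] then String.ofList (pvLoopA [] dir (p1 :: rest))
      else String.ofList (pvLoopA p0 dir (p1 :: rest))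
  | _ => ""  -- Python A raises IndexError here (input without '/' or '\'); excluded by Pre_

-- ===== PORT B =====
-- Source B's loop and final join: one forward pass recording the last index of '2D'/'3D', then one join.
def pvScanB (pre dir : List Char) (body : List (List Char)) : List Char :=
  let last : Int := (PySem.List.enumerate body).foldl
      (fun acc ie => if ie.2 = ['2','D'] ∨ ie.2 = ['3','D'] then ie.1 else acc) (-1)
  if 0 ≤ last then PySem.Chars.join ['/'] (pre :: PySem.List.slice body none (some last)) else dir

def GetStudioRoot_alt (directory : String) : String :=
  let dir := PySem.Chars.replace directory.toList ['\\'] ['/']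
  let parts := PySem.Chars.splitOn dir ['/']
  match PySem.List.pyGet? parts 1 with
  | none => ""  -- Source B also raises IndexError here (parts[1]); excluded by Pre_
  | some p1 =>
      let pb := if p1 = [] then (['/'], parts.drop 2)
                else if parts.headI = [] then (([] : List Char), parts.drop 1)
                else (parts.headI, parts.drop 1)
      String.ofList (pvScanB pb.1 dir pb.2)

-- ===== PRECONDITION & SPEC =====
-- Pre_ excludes exactly the inputs containing neither '/' nor '\', on which Python A raises IndexError
-- (directorySplit[1] with a single-element split).
def Pre_GetStudioRoot (directory : String) : Prop :=
  '/' ∈ directory.toList ∨ '\\' ∈ directory.toList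
instance (directory : String) : Decidable (Pre_GetStudioRoot directory) := by
  unfold Pre_GetStudioRoot; infer_instance

def pvWitness_GetStudioRoot : String := "/jobs/show/2D/comp"

def Spec_GetStudioRoot (directory : String) (out : String) : Prop := out = GetStudioRoot_alt directory
instance (directory : String) (out : String) : Decidable (Spec_GetStudioRoot directory out) := by
  unfold Spec_GetStudioRoot; infer_instance

-- ===== CLAIM (what is proved, stated in full; the proofs are below) =====
def Claim_equal_GetStudioRoot : Prop := ∀ (directory : String), Dom_GetStudioRoot directory → Pre_GetStudioRoot directory → Spec_GetStudioRoot directory (GetStudioRoot directory)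

-- ===== LEMMAS AND PROOFS =====

-- last index of a '2D'/'3D' item, the common characterization of both loops
def pvLastIdx? : List (List Char) → Option Nat
  | [] => none
  | x :: xs =>
      match pvLastIdx? xs with
      | some j => some (j + 1)
      | none => if x = ['2','D'] ∨ x = ['3','D'] then some 0 else none

theorem pvLastIdx?_lt {l : List (List Char)} {j : Nat} (h : pvLastIdx? l = some j) :
    j < l.length := by
  induction l generalizing j with
  | nil => simp [pvLastIdx?] at h
  | cons x xs ih =>
    simp only [pvLastIdx?] at h
    cases hx : pvLastIdx? xs with
    | some k =>
      rw [hx] at h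
      have hk := ih hx
      simp only [Option.some.injEq] at h
      simp only [List.length_cons]
      omega
    | none =>
      rw [hx] at h
      by_cases hp : x = ['2','D'] ∨ x = ['3','D']
      · rw [if_pos hp] at h
        simp only [Option.some.injEq] at h
        simp only [List.length_cons]
        omega
      · rw [if_neg hp] at h
        exact absurd h (by simp)

theorem pvLastIdx?_concat (l : List (List Char)) (a : List Char) :
    pvLastIdx? (l ++ [a]) =
      if a = ['2','D'] ∨ a = ['3','D'] then some l.length else pvLastIdx? l := by
  induction l with
  | nil => simp [pvLastIdx?]
  | cons x xs ih =>
    simp only [List.cons_append, pvLastIdx?, ih]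
    by_cases hp : a = ['2','D'] ∨ a = ['3','D']
    · simp only [if_pos hp, List.length_cons]
    · simp only [if_neg hp]

-- A's while-loop computes: the fold over the prefix before the LAST '2D'/'3D', else dir.
theorem loopA_eq (studio dir : List Char) (body : List (List Char)) :
    pvLoopA studio dir body =
      match pvLastIdx? body with
      | none => dir
      | some i => (body.take i).foldl (fun s p => s ++ '/' :: p) studio := by
  induction body using List.reverseRecOn with
  | nil => simp [pvLoopA, pvLastIdx?]
  | append_singleton l a ih =>
    rw [pvLoopA]
    have hne : l ++ [a] ≠ [] := by simp
    rw [dif_neg hne]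
    simp only [List.getLast_concat, List.dropLast_concat]
    rw [pvLastIdx?_concat]
    by_cases hp : a = ['2','D'] ∨ a = ['3','D']
    · rw [if_pos hp, if_pos hp]
      simp
    · rw [if_neg hp, if_neg hp, ih]
      cases hidx : pvLastIdx? l with
      | none => rfl
      | some i =>
        have hlt := pvLastIdx?_lt hidx
        simp only []
        rw [List.take_append_of_le_length (by omega)]

-- B's forward scan computes the last index (with any start offset), -1 when absent.
theorem scan_eq (body : List (List Char)) (s acc : Int) :
    (PySem.List.enumerate body s).foldl
        (fun acc ie => if ie.2 = ['2','D'] ∨ ie.2 = ['3','D'] then ie.1 else acc) acc =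
      match pvLastIdx? body with
      | none => acc
      | some i => s + i := by
  induction body generalizing s acc with
  | nil => simp [PySem.List.enumerate_nil, pvLastIdx?]
  | cons x xs ih =>
    rw [PySem.List.enumerate_cons]
    simp only [List.foldl_cons, pvLastIdx?]
    rw [ih]
    cases hx : pvLastIdx? xs with
    | some j => simp only []; push_cast; ring
    | none => by_cases hp : x = ['2','D'] ∨ x = ['3','D'] <;> simp [hp]

-- '/'.join(pre :: l) is A's accumulating fold.
theorem join_eq_foldl (l : List (List Char)) (pre : List Char) :
    PySem.Chars.join ['/'] (pre :: l) = l.foldl (fun s p => s ++ '/' :: p) pre := by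
  induction l generalizing pre with
  | nil => simp [PySem.Chars.join_singleton]
  | cons x xs ih =>
    rw [List.foldl_cons, ← ih]
    rw [PySem.Chars.join_cons_cons]
    cases xs with
    | nil => simp [PySem.Chars.join_singleton]
    | cons y ys => rw [PySem.Chars.join_cons_cons, PySem.Chars.join_cons_cons]; simp

-- the cores agree
theorem core_eq (pre dir : List Char) (body : List (List Char)) :
    pvLoopA pre dir body = pvScanB pre dir body := by
  rw [loopA_eq]
  unfold pvScanB
  rw [scan_eq]
  cases hidx : pvLastIdx? body with
  | none => norm_num
  | some i =>
    simp only []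
    rw [if_pos (by simp), PySem.List.slice_to body (b := 0 + (i:Int)) (by simp), join_eq_foldl]
    congr 2
    simp

-- ===== VERDICT (by name: the statement is the Claim_ definition above) =====
theorem GetStudioRoot_spec : Claim_equal_GetStudioRoot := by
  intro directory _ _
  unfold Spec_GetStudioRoot GetStudioRoot GetStudioRoot_alt
  simp only []
  cases PySem.Chars.splitOn (PySem.Chars.replace directory.toList ['\\'] ['/']) ['/'] with
  | nil => rfl
  | cons p0 tl =>
    cases tl with
    | nil => rfl
    | cons p1 rest =>
      have hget : PySem.List.pyGet? (p0 :: p1 :: rest) (1 : Int) = some p1 := by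
        simp [PySem.List.pyGet?, PySem.List.pyIdx?]
      rw [hget]
      simp only [List.headI, List.drop]
      by_cases h1 : p1 = []
      · simp only [if_pos h1, core_eq]
      · by_cases h0 : p0 = []
        · simp only [if_neg h1, if_pos h0, core_eq]
        · simp only [if_neg h1, if_neg h0, core_eq]
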